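-- pv_equiv track=rewrite | github.com/mines-nancy-tcss5ac-2018/td1-coriande | ex22.py | score_lettre
-- ===== SOURCE A (Python) =====
-- def score_lettre(lettre):
--     alphabet="ABCDEFGHIJKLMNOPQRSTUVWXYZ"
--     a=0
--     for i in range (25):
--         if lettre==alphabet[i]:
--             a=i+1
--             return (int(a))
--     return a
-- ===== SOURCE B (Python) =====
-- def score_lettre(lettre):
--     # Closed form: no scan over the alphabet string.
--     if isinstance(lettre, str) and len(lettre) == 1 and 'A' <= lettre <= 'Z':
--         return ord(lettre) - ord('A') + 1
--     return 0
-- ===== Notes on version B (the rewrite author's own statement) =====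
-- stated objective: simpler
-- what changed: Replaced the 25-step scan over the alphabet string with a closed-form ord(lettre)-ord('A')+1 behind a one-character range guard.
-- intended difference: On the single input "Z", A returns 0 because its loop runs range(25) and never reaches the 26th letter, while B returns 26, the intended alphabet score of Z. — e.g. on score_lettre("Z"): A returns 0, B returns 26
import Mathlib
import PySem

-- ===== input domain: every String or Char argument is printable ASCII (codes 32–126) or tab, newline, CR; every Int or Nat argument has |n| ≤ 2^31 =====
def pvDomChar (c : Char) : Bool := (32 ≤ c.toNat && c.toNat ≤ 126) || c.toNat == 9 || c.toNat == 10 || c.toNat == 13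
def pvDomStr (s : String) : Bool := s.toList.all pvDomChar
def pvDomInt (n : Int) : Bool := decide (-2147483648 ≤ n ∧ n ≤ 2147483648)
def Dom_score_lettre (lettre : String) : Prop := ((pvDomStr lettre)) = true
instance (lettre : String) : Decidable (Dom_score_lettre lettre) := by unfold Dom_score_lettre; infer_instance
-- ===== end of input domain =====

-- B replaces A's scan over the alphabet with a closed-form code-point computation; A's loop stops
-- one letter short (range(25)), so A returns 0 on "Z" where B returns the intended 26 (see D_ below).

-- ===== PORT A =====
-- the loop 'for i in range(25): if lettre == alphabet[i]: return i+1' with early return;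
-- Python compares the string lettre with the one-character string alphabet[i], ported as
-- 'lettre.toList = [ch]' (equal iff the strings are equal); the none branch of pyGet? is
-- unreachable (every index of range(25) is in range of the 26-character alphabet).
def scoreA_loop (lettre : String) : List Int → Int
  | [] => 0
  | i :: rest =>
    match PySem.Str.pyGet? "ABCDEFGHIJKLMNOPQRSTUVWXYZ" i with
    | some ch => if lettre.toList = [ch] then i + 1 else scoreA_loop lettre rest
    | none => 0

def score_lettre (lettre : String) : Int :=
  scoreA_loop lettre (PySem.List.pyRange 0 25 1)

-- ===== PORT B =====
-- Source B: one-character guard, then 'A' <= lettre <= 'Z' (on a one-character string this is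
-- exactly the comparison of its single character), then ord(lettre) - ord('A') + 1.
def score_lettre_alt (lettre : String) : Int :=
  match lettre.toList with
  | [c] => if 'A' ≤ c ∧ c ≤ 'Z' then (c.toNat : Int) - 65 + 1 else 0
  | _ => 0

-- ===== PRECONDITION & SPEC =====
-- On the single input "Z", A returns 0 (its loop runs range(25) and never tests the 26th letter)
-- while B returns 26, the intended alphabet score of Z.
def D_score_lettre (lettre : String) : Prop := lettre = "Z"
instance (lettre : String) : Decidable (D_score_lettre lettre) := by unfold D_score_lettre; infer_instance

def Spec_score_lettre (lettre : String) (out : Int) : Prop := ¬ D_score_lettre lettre → out = score_lettre_alt lettre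
instance (lettre : String) (out : Int) : Decidable (Spec_score_lettre lettre out) := by unfold Spec_score_lettre; infer_instance

def pvDiffWitness_score_lettre : String := "Z"
def pvDiffWitnessOut_score_lettre : Int × Int := (0, 26)

-- ===== CLAIM (what is proved, stated in full; the proofs are below) =====
def Claim_unchanged_score_lettre : Prop := ∀ (lettre : String), Dom_score_lettre lettre → Spec_score_lettre lettre (score_lettre lettre)
def Claim_changed_score_lettre : Prop := Dom_score_lettre (pvDiffWitness_score_lettre) ∧ D_score_lettre (pvDiffWitness_score_lettre) ∧ score_lettre (pvDiffWitness_score_lettre) = pvDiffWitnessOut_score_lettre.1 ∧ score_lettre_alt (pvDiffWitness_score_lettre) = pvDiffWitnessOut_score_lettre.2 ∧ pvDiffWitnessOut_score_lettre.1 ≠ pvDiffWitnessOut_score_lettre.2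
def Claim_exact_score_lettre : Prop := ∀ (lettre : String), Dom_score_lettre lettre → D_score_lettre lettre → score_lettre lettre ≠ score_lettre_alt lettre

-- ===== LEMMAS AND PROOFS =====

theorem char_eq_of_toNat_eq {c d : Char} (h : c.toNat = d.toNat) : c = d :=
  Char.ext (UInt32.toNat_inj.mp h)

-- a string whose character list is not a singleton matches no letter in A's loop and scores 0
theorem scoreA_loop_not_single (lettre : String) (h : ∀ ch : Char, lettre.toList ≠ [ch])
    (l : List Int) : scoreA_loop lettre l = 0 := by
  induction l with
  | nil => rfl
  | cons i rest ih =>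
    unfold scoreA_loop
    cases PySem.Str.pyGet? "ABCDEFGHIJKLMNOPQRSTUVWXYZ" i with
    | none => rfl
    | some ch => simp [h ch, ih]

-- the single-character case: A's scan agrees with B's closed form for every character but 'Z'
theorem single_char_eq (lettre : String) (c : Char) (hl : lettre.toList = [c]) (hz : c ≠ 'Z') :
    score_lettre lettre = score_lettre_alt lettre := by
  by_cases h0 : c = 'A'
  · subst h0
    have he : lettre = "A" := String.toList_inj.mp (by rw [hl]; decide)
    subst he; decide
  by_cases h1 : c = 'B'
  · subst h1
    have he : lettre = "B" := String.toList_inj.mp (by rw [hl]; decide)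
    subst he; decide
  by_cases h2 : c = 'C'
  · subst h2
    have he : lettre = "C" := String.toList_inj.mp (by rw [hl]; decide)
    subst he; decide
  by_cases h3 : c = 'D'
  · subst h3
    have he : lettre = "D" := String.toList_inj.mp (by rw [hl]; decide)
    subst he; decide
  by_cases h4 : c = 'E'
  · subst h4
    have he : lettre = "E" := String.toList_inj.mp (by rw [hl]; decide)
    subst he; decide
  by_cases h5 : c = 'F'
  · subst h5
    have he : lettre = "F" := String.toList_inj.mp (by rw [hl]; decide)
    subst he; decide
  by_cases h6 : c = 'G'
  · subst h6
    have he : lettre = "G" := String.toList_inj.mp (by rw [hl]; decide)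
    subst he; decide
  by_cases h7 : c = 'H'
  · subst h7
    have he : lettre = "H" := String.toList_inj.mp (by rw [hl]; decide)
    subst he; decide
  by_cases h8 : c = 'I'
  · subst h8
    have he : lettre = "I" := String.toList_inj.mp (by rw [hl]; decide)
    subst he; decide
  by_cases h9 : c = 'J'
  · subst h9
    have he : lettre = "J" := String.toList_inj.mp (by rw [hl]; decide)
    subst he; decide
  by_cases h10 : c = 'K'
  · subst h10
    have he : lettre = "K" := String.toList_inj.mp (by rw [hl]; decide)
    subst he; decide
  by_cases h11 : c = 'L'
  · subst h11
    have he : lettre = "L" := String.toList_inj.mp (by rw [hl]; decide)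
    subst he; decide
  by_cases h12 : c = 'M'
  · subst h12
    have he : lettre = "M" := String.toList_inj.mp (by rw [hl]; decide)
    subst he; decide
  by_cases h13 : c = 'N'
  · subst h13
    have he : lettre = "N" := String.toList_inj.mp (by rw [hl]; decide)
    subst he; decide
  by_cases h14 : c = 'O'
  · subst h14
    have he : lettre = "O" := String.toList_inj.mp (by rw [hl]; decide)
    subst he; decide
  by_cases h15 : c = 'P'
  · subst h15
    have he : lettre = "P" := String.toList_inj.mp (by rw [hl]; decide)
    subst he; decide
  by_cases h16 : c = 'Q'
  · subst h16
    have he : lettre = "Q" := String.toList_inj.mp (by rw [hl]; decide)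
    subst he; decide
  by_cases h17 : c = 'R'
  · subst h17
    have he : lettre = "R" := String.toList_inj.mp (by rw [hl]; decide)
    subst he; decide
  by_cases h18 : c = 'S'
  · subst h18
    have he : lettre = "S" := String.toList_inj.mp (by rw [hl]; decide)
    subst he; decide
  by_cases h19 : c = 'T'
  · subst h19
    have he : lettre = "T" := String.toList_inj.mp (by rw [hl]; decide)
    subst he; decide
  by_cases h20 : c = 'U'
  · subst h20
    have he : lettre = "U" := String.toList_inj.mp (by rw [hl]; decide)
    subst he; decide
  by_cases h21 : c = 'V'
  · subst h21
    have he : lettre = "V" := String.toList_inj.mp (by rw [hl]; decide)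
    subst he; decide
  by_cases h22 : c = 'W'
  · subst h22
    have he : lettre = "W" := String.toList_inj.mp (by rw [hl]; decide)
    subst he; decide
  by_cases h23 : c = 'X'
  · subst h23
    have he : lettre = "X" := String.toList_inj.mp (by rw [hl]; decide)
    subst he; decide
  by_cases h24 : c = 'Y'
  · subst h24
    have he : lettre = "Y" := String.toList_inj.mp (by rw [hl]; decide)
    subst he; decide
  · -- c is none of 'A'..'Y' and not 'Z': both sides are 0
    have hrange : ¬ ('A' ≤ c ∧ c ≤ 'Z') := by
      rintro ⟨ha, hb⟩
      rw [Char.le_def, UInt32.le_iff_toNat_le] at ha hb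
      have e1 : c.toNat = c.val.toNat := rfl
      have e2 : ('A' : Char).val.toNat = 65 := by decide
      have e3 : ('Z' : Char).val.toNat = 90 := by decide
      have hzn : c.toNat ≠ 90 := fun h => hz (char_eq_of_toNat_eq h)
      have hno : c.toNat ≠ 65 ∧ c.toNat ≠ 66 ∧ c.toNat ≠ 67 ∧ c.toNat ≠ 68 ∧ c.toNat ≠ 69 ∧
          c.toNat ≠ 70 ∧ c.toNat ≠ 71 ∧ c.toNat ≠ 72 ∧ c.toNat ≠ 73 ∧ c.toNat ≠ 74 ∧
          c.toNat ≠ 75 ∧ c.toNat ≠ 76 ∧ c.toNat ≠ 77 ∧ c.toNat ≠ 78 ∧ c.toNat ≠ 79 ∧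
          c.toNat ≠ 80 ∧ c.toNat ≠ 81 ∧ c.toNat ≠ 82 ∧ c.toNat ≠ 83 ∧ c.toNat ≠ 84 ∧
          c.toNat ≠ 85 ∧ c.toNat ≠ 86 ∧ c.toNat ≠ 87 ∧ c.toNat ≠ 88 ∧ c.toNat ≠ 89 := by
        refine ⟨?_, ?_, ?_, ?_, ?_, ?_, ?_, ?_, ?_, ?_, ?_, ?_, ?_, ?_, ?_, ?_, ?_, ?_, ?_, ?_, ?_, ?_, ?_, ?_, ?_⟩ <;>
          exact fun h => by first
            | exact h0 (char_eq_of_toNat_eq h)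
            | exact h1 (char_eq_of_toNat_eq h)
            | exact h2 (char_eq_of_toNat_eq h)
            | exact h3 (char_eq_of_toNat_eq h)
            | exact h4 (char_eq_of_toNat_eq h)
            | exact h5 (char_eq_of_toNat_eq h)
            | exact h6 (char_eq_of_toNat_eq h)
            | exact h7 (char_eq_of_toNat_eq h)
            | exact h8 (char_eq_of_toNat_eq h)
            | exact h9 (char_eq_of_toNat_eq h)
            | exact h10 (char_eq_of_toNat_eq h)
            | exact h11 (char_eq_of_toNat_eq h)
            | exact h12 (char_eq_of_toNat_eq h)
            | exact h13 (char_eq_of_toNat_eq h)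
            | exact h14 (char_eq_of_toNat_eq h)
            | exact h15 (char_eq_of_toNat_eq h)
            | exact h16 (char_eq_of_toNat_eq h)
            | exact h17 (char_eq_of_toNat_eq h)
            | exact h18 (char_eq_of_toNat_eq h)
            | exact h19 (char_eq_of_toNat_eq h)
            | exact h20 (char_eq_of_toNat_eq h)
            | exact h21 (char_eq_of_toNat_eq h)
            | exact h22 (char_eq_of_toNat_eq h)
            | exact h23 (char_eq_of_toNat_eq h)
            | exact h24 (char_eq_of_toNat_eq h)
      omega
    have hR : PySem.List.pyRange 0 25 1 =
        [0,1,2,3,4,5,6,7,8,9,10,11,12,13,14,15,16,17,18,19,20,21,22,23,24] := by decide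
    have hloop : score_lettre lettre = 0 := by
      rw [score_lettre, hR]
      have hAl : "ABCDEFGHIJKLMNOPQRSTUVWXYZ".toList =
          ['A','B','C','D','E','F','G','H','I','J','K','L','M',
           'N','O','P','Q','R','S','T','U','V','W','X','Y','Z'] := by decide
      simp only [scoreA_loop, PySem.Str.pyGet?, hAl]
      norm_num [hl, PySem.List.pyGet?, PySem.List.pyIdx?, Int.toNat, h0, h1, h2, h3, h4, h5, h6, h7, h8, h9, h10, h11, h12, h13, h14, h15, h16, h17, h18, h19, h20, h21, h22, h23, h24]
    rw [hloop, score_lettre_alt, hl]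
    simp [hrange]

-- ===== VERDICT (by name: the statement is the Claim_ definition above) =====
theorem score_lettre_spec : Claim_unchanged_score_lettre := by
  intro lettre _ hD
  show score_lettre lettre = score_lettre_alt lettre
  cases hl : lettre.toList with
  | nil =>
    have h : ∀ ch : Char, lettre.toList ≠ [ch] := by simp [hl]
    rw [score_lettre, scoreA_loop_not_single lettre h, score_lettre_alt, hl]
  | cons c rest =>
    cases rest with
    | nil =>
      have hz : c ≠ 'Z' := by
        intro h; subst h
        exact hD (String.toList_inj.mp (by rw [hl]; decide))
      exact single_char_eq lettre c hl hz
    | cons d rest' =>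
      have h : ∀ ch : Char, lettre.toList ≠ [ch] := by simp [hl]
      rw [score_lettre, scoreA_loop_not_single lettre h, score_lettre_alt, hl]

theorem score_lettre_changed : Claim_changed_score_lettre := by
  unfold Claim_changed_score_lettre; decide

theorem score_lettre_tight : Claim_exact_score_lettre := by
  intro lettre _ hD
  subst hD
  decide
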